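-- pv_equiv track=rewrite | github.com/jstout211/enigma_MEG | enigmeg/QA/enigma_QA_GUI_functions.py | get_last_review
-- ===== SOURCE A (Python) =====
-- def get_last_review(history_log):
--     '''Extract the start and stop of the last review
--     Return the log lines from the last review'''
--     rev_start_idx=0
--     rev_end_idx=0
--     for idx, line in enumerate(history_log):
--         cond=line.split('INFO::')[-1]
--         if cond=='REVIEW_START':
--             rev_start_idx=idx
--         elif cond=='REVIEW_FINISH':
--             rev_end_idx=idx
--     last_review=history_log[rev_start_idx+1:rev_end_idx]
--     return last_review
-- ===== SOURCE B (Python) =====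
-- def get_last_review(history_log):
--     '''Extract the start and stop of the last review
--     Return the log lines from the last review'''
--     rev_start_idx = 0
--     rev_end_idx = 0
--     found_start = False
--     found_end = False
--     for idx in range(len(history_log) - 1, -1, -1):
--         cond = history_log[idx].split('INFO::')[-1]
--         if not found_end and cond == 'REVIEW_FINISH':
--             rev_end_idx = idx
--             found_end = True
--         if not found_start and cond == 'REVIEW_START':
--             rev_start_idx = idx
--             found_start = True
--         if found_start and found_end:
--             break
--     return history_log[rev_start_idx + 1:rev_end_idx]
-- ===== Notes on version B (the rewrite author's own statement) =====
-- stated objective: alternative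
-- what changed: B scans the log backwards with found-flags and breaks as soon as the last REVIEW_START and last REVIEW_FINISH indices are located, instead of A's full forward pass that keeps overwriting both indices.
import Mathlib
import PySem

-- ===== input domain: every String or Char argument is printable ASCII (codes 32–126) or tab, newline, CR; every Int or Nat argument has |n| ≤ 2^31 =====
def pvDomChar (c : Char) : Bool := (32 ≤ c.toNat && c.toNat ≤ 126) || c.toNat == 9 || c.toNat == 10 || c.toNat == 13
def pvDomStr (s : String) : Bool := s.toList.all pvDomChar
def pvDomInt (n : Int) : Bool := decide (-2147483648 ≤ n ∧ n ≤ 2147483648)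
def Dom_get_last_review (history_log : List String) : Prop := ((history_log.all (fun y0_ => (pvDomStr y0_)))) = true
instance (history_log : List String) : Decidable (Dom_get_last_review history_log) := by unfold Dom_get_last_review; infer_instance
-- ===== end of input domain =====

-- B scans backwards with early break; A makes one forward pass. Same return value everywhere.

-- cond = line.split('INFO::')[-1]  (split of a nonempty separator is never empty)
def pvCond (line : String) : String := ((PySem.Str.split? line "INFO::").getD []).getLastD ""

-- ===== PORT A =====
def get_last_review (history_log : List String) : List String :=
  let st := (PySem.List.enumerate history_log 0).foldl
    (fun (st : Int × Int) (p : Int × String) =>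
      let cond := pvCond p.2
      if cond == "REVIEW_START" then (p.1, st.2)
      else if cond == "REVIEW_FINISH" then (st.1, p.1)
      else st) (0, 0)
  PySem.List.slice history_log (some (st.1 + 1)) (some st.2)

-- ===== PORT B =====
-- backward loop: n counts the remaining prefix; current index is n-1; break once both flags set
def pvRevScan (history_log : List String) : Nat → Bool → Bool → Int → Int → Int × Int
  | 0, _, _, s, e => (s, e)
  | n + 1, fs, fe, s, e =>
    let cond := pvCond (history_log.getD n "")
    let (e', fe') := if !fe && cond == "REVIEW_FINISH" then ((n : Int), true) else (e, fe)
    let (s', fs') := if !fs && cond == "REVIEW_START" then ((n : Int), true) else (s, fs)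
    if fs' && fe' then (s', e')
    else pvRevScan history_log n fs' fe' s' e'

def get_last_review_alt (history_log : List String) : List String :=
  let st := pvRevScan history_log history_log.length false false 0 0
  PySem.List.slice history_log (some (st.1 + 1)) (some st.2)

-- ===== PRECONDITION & SPEC =====
def Spec_get_last_review (history_log : List String) (out : List String) : Prop := out = get_last_review_alt history_log
instance (history_log : List String) (out : List String) : Decidable (Spec_get_last_review history_log out) := by unfold Spec_get_last_review; infer_instance

-- ===== CLAIM (what is proved, stated in full; the proofs are below) =====
def Claim_equal_get_last_review : Prop := ∀ (history_log : List String), Dom_get_last_review history_log → Spec_get_last_review history_log (get_last_review history_log)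

-- ===== LEMMAS AND PROOFS =====

-- last index m < n with p (log[m]), default d
def pvLastBelow (p : String → Bool) (log : List String) : Nat → Int → Int
  | 0, d => d
  | n + 1, d => if p (log.getD n "") then (n : Int) else pvLastBelow p log n d

theorem pvRevScan_eq (log : List String) (n : Nat) (fs fe : Bool) (s e : Int) :
    pvRevScan log n fs fe s e =
      ((if fs then s else pvLastBelow (fun l => pvCond l == "REVIEW_START") log n s),
       (if fe then e else pvLastBelow (fun l => pvCond l == "REVIEW_FINISH") log n e)) := by
  induction n generalizing fs fe s e with
  | zero => simp [pvRevScan, pvLastBelow]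
  | succ m ih =>
    simp only [pvRevScan, pvLastBelow]
    cases fs <;> cases fe <;>
      by_cases hS : pvCond (log[m]?.getD "") = "REVIEW_START" <;>
      by_cases hF : pvCond (log[m]?.getD "") = "REVIEW_FINISH" <;>
      first
        | (exact absurd (hS ▸ hF) (by decide))
        | simp [hS, hF, ih, List.getD]

theorem pvLastBelow_append (p : String → Bool) (log : List String) (x : String)
    (n : Nat) (d : Int) (h : n ≤ log.length) :
    pvLastBelow p (log ++ [x]) n d = pvLastBelow p log n d := by
  induction n generalizing d with
  | zero => rfl
  | succ m ih =>
    simp only [pvLastBelow]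
    rw [List.getD_append _ _ _ _ (by omega), ih d (by omega)]

theorem pvFold_eq (log : List String) (s e : Int) :
    ((PySem.List.enumerate log 0).foldl
      (fun (st : Int × Int) (p : Int × String) =>
        let cond := pvCond p.2
        if cond == "REVIEW_START" then (p.1, st.2)
        else if cond == "REVIEW_FINISH" then (st.1, p.1)
        else st) (s, e)) =
      (pvLastBelow (fun l => pvCond l == "REVIEW_START") log log.length s,
       pvLastBelow (fun l => pvCond l == "REVIEW_FINISH") log log.length e) := by
  induction log using List.reverseRecOn with
  | nil => simp [PySem.List.enumerate_nil, pvLastBelow]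
  | append_singleton ys x ih =>
    rw [PySem.List.enumerate_append]
    simp only [List.foldl_append, ih]
    by_cases hS : pvCond x = "REVIEW_START" <;>
      by_cases hF : pvCond x = "REVIEW_FINISH" <;>
      first
        | (exact absurd (hS ▸ hF) (by decide))
        | simp [PySem.List.enumerate_cons, PySem.List.enumerate_nil, pvLastBelow, List.getD, hS, hF,
            pvLastBelow_append _ ys x ys.length _ (le_refl _)]

theorem get_last_review_spec : Claim_equal_get_last_review := by
  intro log _
  unfold Spec_get_last_review get_last_review get_last_review_alt
  rw [pvRevScan_eq, pvFold_eq]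
  simp
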